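-- pv_equiv track=rewrite | github.com/peter-lyr/pys | 03-git-pull-recursive.py | level_gitmodules
-- ===== SOURCE A (Python) =====
-- def level_gitmodules(dotgitmodules):
--     new = {}
--     for gitmodule in dotgitmodules:
--         level = len(gitmodule.replace("/", "\\").split("\\"))
--         if level not in new:
--             new[level] = []
--         new[level].append(gitmodule)
--     levels = new.keys()
--     dotgitmodules_from_leaves_to_root = []
--     for level in sorted(levels, reverse=True):
--         dotgitmodules_from_leaves_to_root.append(new[level])
--     return dotgitmodules_from_leaves_to_root
-- ===== SOURCE B (Python) =====
-- def level_gitmodules(dotgitmodules):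
--     def lvl(g):
--         return len(g.replace("/", "\\").split("\\"))
--     levels = sorted({lvl(g) for g in dotgitmodules}, reverse=True)
--     return [[g for g in dotgitmodules if lvl(g) == level] for level in levels]
-- ===== Notes on version B (the rewrite author's own statement) =====
-- stated objective: simpler
-- what changed: Replaces the dict-bucketing loop plus key sort with a direct decomposition: sort the distinct levels (a set) descending, then select each group with one filter comprehension per level.
import Mathlib
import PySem

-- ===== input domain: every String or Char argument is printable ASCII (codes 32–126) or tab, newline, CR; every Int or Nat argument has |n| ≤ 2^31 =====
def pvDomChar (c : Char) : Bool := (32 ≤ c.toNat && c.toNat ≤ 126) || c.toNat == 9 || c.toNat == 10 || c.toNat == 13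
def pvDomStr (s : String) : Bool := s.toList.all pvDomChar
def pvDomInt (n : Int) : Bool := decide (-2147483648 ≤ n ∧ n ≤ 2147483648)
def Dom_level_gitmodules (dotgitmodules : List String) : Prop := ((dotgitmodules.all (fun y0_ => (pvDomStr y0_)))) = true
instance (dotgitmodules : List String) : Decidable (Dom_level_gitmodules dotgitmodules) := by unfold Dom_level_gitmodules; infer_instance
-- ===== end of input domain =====

-- B groups by sorting the distinct levels descending and filtering the input once per level,
-- instead of A's dict bucketing followed by a key sort (objective: simpler; same return value).

-- shared helper: len(g.replace("/", "\\").split("\\"))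
def pvLevel (g : String) : Int :=
  ((PySem.Str.split? (PySem.Str.replace g "/" "\\") "\\").getD []).length

-- ===== PORT A =====
-- new[level] on a key built by the loop: always present, ported as getD with [].
def level_gitmodules (dotgitmodules : List String) : List (List String) :=
  let new := dotgitmodules.foldl (fun d gitmodule =>
    let level := pvLevel gitmodule
    let d := if d.contains level then d else d.insert level ([] : List String)
    d.modify level [] (fun v => v ++ [gitmodule])) PySem.Dict.empty
  (PySem.List.sorted new.keys (fun x => x) true).foldl
    (fun acc level => acc ++ [new.getD level []]) []

-- ===== PORT B =====
def level_gitmodules_alt (dotgitmodules : List String) : List (List String) :=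
  let levels := PySem.List.sorted (PySem.Set.ofList (dotgitmodules.map pvLevel)) (fun x => x) true
  levels.map (fun level => dotgitmodules.filter (fun g => pvLevel g == level))

-- ===== PRECONDITION & SPEC =====
def Spec_level_gitmodules (dotgitmodules : List String) (out : List (List String)) : Prop := out = level_gitmodules_alt dotgitmodules
instance (dotgitmodules : List String) (out : List (List String)) : Decidable (Spec_level_gitmodules dotgitmodules out) := by unfold Spec_level_gitmodules; infer_instance

-- ===== CLAIM (what is proved, stated in full; the proofs are below) =====
def Claim_equal_level_gitmodules : Prop := ∀ (dotgitmodules : List String), Dom_level_gitmodules dotgitmodules → Spec_level_gitmodules dotgitmodules (level_gitmodules dotgitmodules)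

-- ===== LEMMAS AND PROOFS =====

-- A's setdefault-then-append step is a single modify.
theorem pv_step_eq (d : PySem.Dict Int (List String)) (g : String) :
    (let level := pvLevel g
     let d' := if d.contains level then d else d.insert level ([] : List String)
     d'.modify level [] (fun v => v ++ [g])) = d.modify (pvLevel g) [] (fun v => v ++ [g]) := by
  by_cases h : d.contains (pvLevel g)
  · simp [h]
  · rw [Bool.not_eq_true] at h
    simp [h, PySem.Dict.modify, PySem.Dict.insert_insert_self, PySem.Dict.getD,
      (PySem.Dict.get?_eq_none_iff_contains d (pvLevel g)).mpr h]

theorem pv_fold_eq (xs : List String) :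
    (xs.foldl (fun d gitmodule =>
        let level := pvLevel gitmodule
        let d := if d.contains level then d else d.insert level ([] : List String)
        d.modify level [] (fun v => v ++ [gitmodule])) PySem.Dict.empty)
      = xs.foldl (fun d g => d.modify (pvLevel g) [] (fun v => v ++ [g])) PySem.Dict.empty := by
  congr 1
  funext d g
  exact pv_step_eq d g

theorem pv_getD_fold (xs : List String) (c : Int) :
    (xs.foldl (fun d g => d.modify (pvLevel g) [] (fun v => v ++ [g])) PySem.Dict.empty).getD c []
      = xs.filter (fun g => pvLevel g == c) := by
  have h := PySem.Dict.getD_foldl_modify_append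
      (l := xs.map (fun g => (pvLevel g, g))) (d := PySem.Dict.empty) (c := c)
  rw [List.foldl_map] at h
  simpa [List.filter_map, Function.comp_def] using h

theorem pv_keys_fold (xs : List String) :
    (xs.foldl (fun d g => d.modify (pvLevel g) [] (fun v => v ++ [g])) PySem.Dict.empty).keys
      = PySem.Set.ofList (xs.map pvLevel) := by
  rw [PySem.Dict.keys_foldl_modify_key]
  simp [PySem.Set.update_nil_left, PySem.Dict.empty]

-- ===== VERDICT (by name: the statement is the Claim_ definition above) =====
theorem level_gitmodules_spec : Claim_equal_level_gitmodules := by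
  intro xs _
  unfold Spec_level_gitmodules level_gitmodules level_gitmodules_alt
  simp only [pv_fold_eq, pv_keys_fold]
  rw [PySem.List.foldl_append_eq_flatMap, ← List.map_eq_flatMap]
  simp [pv_getD_fold]
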